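-- pv_equiv track=rewrite | github.com/nuoxoxo/leetcode | leet_GRDY_1404_reduce_to_1.py | Greedy_backwards
-- ===== SOURCE A (Python) =====
-- def Greedy_backwards(s:str) -> int:
--
--     res, carry = 0, 0
--     # `carry` must be in [0, 1]
--
--     for i in range(len(s) - 1, 0, -1):
--
--         # operation by 2 `//= 2` is always performed
--         # regardless of the digit being ODD or EVEN
--         res += 1
--
--         dig = ord(s[i]) - ord('0') + carry
--         carry = dig // 2
--         dig %= 2
--
--         # if `digit` is 1, we +1 to carry, also +1 steps
--         if dig == 1:
--             res += 1
--             carry += 1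
--
--     res += carry
--     return res
-- ===== SOURCE B (Python) =====
-- def Greedy_backwards(s: str) -> int:
--     n = 0
--     for c in s[1:]:
--         n = 2 * n + (ord(c) - 48)
--     steps = 0
--     for _ in range(len(s) - 1):
--         r = n % 2
--         steps += 1 + r
--         n = (n + r) // 2
--     return steps + n
-- ===== Notes on version B (the rewrite author's own statement) =====
-- stated objective: alternative
-- what changed: Replaces A's right-to-left per-character carry-tracking pass with a value-based computation: fold s[1:] into the integer it denotes, then run len(s)-1 rounds of ceil-halving on that number, counting one step per round plus one per odd value, and add the final remainder.
import Mathlib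
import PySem

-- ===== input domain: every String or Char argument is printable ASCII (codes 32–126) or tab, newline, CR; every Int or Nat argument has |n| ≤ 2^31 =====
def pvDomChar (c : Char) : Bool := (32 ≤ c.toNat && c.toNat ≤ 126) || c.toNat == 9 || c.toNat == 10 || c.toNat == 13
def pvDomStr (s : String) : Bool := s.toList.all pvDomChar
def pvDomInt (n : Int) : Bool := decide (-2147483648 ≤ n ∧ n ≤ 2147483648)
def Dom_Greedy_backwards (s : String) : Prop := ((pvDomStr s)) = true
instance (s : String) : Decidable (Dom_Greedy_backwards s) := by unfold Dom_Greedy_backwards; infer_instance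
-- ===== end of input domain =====

-- B replaces A's backward carry-tracking character pass by a value-based computation (fold
-- s[1:] into an integer, then len(s)-1 ceil-halving rounds); alternative algorithm (not faster:
-- it works on a big integer).


-- ===== PORT A =====
-- loop body of A's `for i in range(len(s)-1, 0, -1)` (state (res, carry));
-- the index i is always in range there, so the pyGetD default is never used.
def stepA (s : String) (st : Int × Int) (i : Int) : Int × Int :=
  let res := st.1 + 1
  let dig := ((PySem.List.pyGetD s.toList i '0').toNat : Int) - 48 + st.2
  let carry := PySem.Int.floordiv dig 2
  let dig := PySem.Int.mod dig 2
  if dig = 1 then (res + 1, carry + 1) else (res, carry)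

def Greedy_backwards (s : String) : Int :=
  let rc := (PySem.List.pyRange (PySem.Str.len s - 1) 0 (-1)).foldl (stepA s) (0, 0)
  rc.1 + rc.2

-- ===== PORT B =====
-- loop body of B's `for _ in range(len(s)-1)` (state (steps, n)): r = n % 2; steps += 1 + r; n = (n + r) // 2
def roundB (st : Int × Int) : Int × Int :=
  let r := PySem.Int.mod st.2 2
  (st.1 + 1 + r, PySem.Int.floordiv (st.2 + r) 2)

-- literal port of B: n = value of s[1:] by a left fold, then the counting loop, then steps + n
def Greedy_backwards_alt (s : String) : Int :=
  let n := (PySem.List.slice s.toList (some 1) none).foldl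
    (fun (a : Int) (c : Char) => 2 * a + ((c.toNat : Int) - 48)) 0
  let p := (PySem.List.pyRange 0 (PySem.Str.len s - 1) 1).foldl (fun st _ => roundB st) (0, n)
  p.1 + p.2

-- ===== PRECONDITION & SPEC =====
-- (no Pre_: both programs are total on every string)

def Spec_Greedy_backwards (s : String) (out : Int) : Prop := out = Greedy_backwards_alt s
instance (s : String) (out : Int) : Decidable (Spec_Greedy_backwards s out) := by unfold Spec_Greedy_backwards; infer_instance

-- ===== CLAIM (what is proved, stated in full; the proofs are below) =====
def Claim_equal_Greedy_backwards : Prop := ∀ (s : String), Dom_Greedy_backwards s → Spec_Greedy_backwards s (Greedy_backwards s)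

-- ===== LEMMAS AND PROOFS =====

-- A's loop body on the digit value itself (d = ord(s[i]) - 48)
def gA (st : Int × Int) (d : Int) : Int × Int :=
  let res := st.1 + 1
  let dig := d + st.2
  let carry := PySem.Int.floordiv dig 2
  let dig := PySem.Int.mod dig 2
  if dig = 1 then (res + 1, carry + 1) else (res, carry)

def bitOf (c : Char) : Int := (c.toNat : Int) - 48

-- the backward pass over the digit list (head of the list is processed LAST, as in A)
def loopA (l : List Int) : Int × Int := l.reverse.foldl gA (0, 0)

theorem loopA_cons (d : Int) (l : List Int) : loopA (d :: l) = gA (loopA l) d := by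
  simp [loopA, List.foldl_append]

-- B's counting loop as iterated rounds (round k+1 applied outermost)
def bloop : Nat → Int × Int → Int × Int
  | 0, p => p
  | k + 1, p => roundB (bloop k p)

theorem bloop_round_comm : ∀ (k : Nat) (p : Int × Int), bloop k (roundB p) = roundB (bloop k p) := by
  intro k
  induction k with
  | zero => intro p; rfl
  | succ k ih => intro p; show roundB (bloop k (roundB p)) = _; rw [ih]; rfl

theorem foldl_const_round : ∀ (L : List Int) (p : Int × Int),
    L.foldl (fun st _ => roundB st) p = bloop L.length p := by
  intro L
  induction L with
  | nil => intro p; rfl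
  | cons x L ih =>
    intro p
    rw [List.foldl_cons, ih (roundB p), bloop_round_comm]
    rfl

-- adding d·2^k to the value leaves k rounds' step count unchanged and adds d to the remainder
theorem bloop_shift : ∀ (k : Nat) (p : Int × Int) (d : Int),
    bloop k (p.1, p.2 + d * 2 ^ k) = ((bloop k p).1, (bloop k p).2 + d) := by
  intro k
  induction k with
  | zero => intro p d; simp [bloop]
  | succ k ih =>
    intro p d
    have h1 : p.2 + d * 2 ^ (k + 1) = p.2 + (2 * d) * 2 ^ k := by ring
    rw [bloop, h1, ih p (2 * d), bloop]
    rcases hq : bloop k p with ⟨a, m⟩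
    have hm : PySem.Int.mod (m + 2 * d) 2 = PySem.Int.mod m 2 := by
      rw [PySem.Int.mod_eq_emod_of_pos (by omega), PySem.Int.mod_eq_emod_of_pos (by omega)]
      omega
    have hr : PySem.Int.mod m 2 = m % 2 := PySem.Int.mod_eq_emod_of_pos (by omega)
    have hd : PySem.Int.floordiv (m + 2 * d + m % 2) 2 = PySem.Int.floordiv (m + m % 2) 2 + d := by
      rw [PySem.Int.floordiv_eq_ediv_of_pos (by omega), PySem.Int.floordiv_eq_ediv_of_pos (by omega)]
      omega
    simp only [roundB, hm, hr, hd]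

-- one round on the remainder-plus-digit is exactly A's loop body
theorem gA_eq_round (q : Int × Int) (d : Int) : gA q d = roundB (q.1, q.2 + d) := by
  have hm : PySem.Int.mod (d + q.2) 2 = (d + q.2) % 2 := PySem.Int.mod_eq_emod_of_pos (by omega)
  have hm' : PySem.Int.mod (q.2 + d) 2 = (q.2 + d) % 2 := PySem.Int.mod_eq_emod_of_pos (by omega)
  have hd : PySem.Int.floordiv (d + q.2) 2 = (d + q.2) / 2 := PySem.Int.floordiv_eq_ediv_of_pos (by omega)
  have hd' : ∀ r : Int, PySem.Int.floordiv (q.2 + d + r) 2 = (q.2 + d + r) / 2 :=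
    fun r => PySem.Int.floordiv_eq_ediv_of_pos (by omega)
  simp only [gA, roundB, hm, hm', hd, hd' ((q.2 + d) % 2)]
  by_cases h : (d + q.2) % 2 = 1
  · rw [if_pos h, show (q.2 + d) % 2 = 1 by omega, Prod.ext_iff]
    constructor
    · ring
    · simp only []
      omega
  · rw [if_neg h, show (q.2 + d) % 2 = 0 by omega, Prod.ext_iff]
    constructor
    · ring
    · simp only []
      omega

-- Horner fold is affine in its initial value
theorem horner_init : ∀ (t : List Int) (x : Int),
    t.foldl (fun a d => 2 * a + d) x = x * 2 ^ t.length + t.foldl (fun a d => 2 * a + d) 0 := by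
  intro t
  induction t with
  | nil => intro x; simp
  | cons e t ih =>
    intro x
    rw [List.foldl_cons, List.foldl_cons, ih (2 * x + e), ih (2 * 0 + e)]
    simp only [List.length_cons, pow_succ]
    ring

-- the core identity: A's backward pass equals |l| counting rounds on the Horner value of l
theorem loopA_eq_bloop : ∀ (l : List Int),
    loopA l = bloop l.length (0, l.foldl (fun a d => 2 * a + d) 0) := by
  intro l
  induction l with
  | nil => rfl
  | cons d t ih =>
    rw [loopA_cons, ih, List.length_cons]
    have hv : (d :: t).foldl (fun a d => 2 * a + d) 0
        = (t.foldl (fun a d => 2 * a + d) 0) + d * 2 ^ t.length := by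
      rw [List.foldl_cons, horner_init t (2 * 0 + d)]
      ring
    rw [hv, bloop,
      show ((0 : Int), t.foldl (fun a d => 2 * a + d) 0 + d * 2 ^ t.length)
         = (((0 : Int), t.foldl (fun a d => 2 * a + d) 0).1,
            ((0 : Int), t.foldl (fun a d => 2 * a + d) 0).2 + d * 2 ^ t.length) from rfl,
      bloop_shift, gA_eq_round]

-- A's port equals the backward pass loopA over the digit values of the tail
def fdig (l : List Char) (i : Int) : Int := ((PySem.List.pyGetD l i '0').toNat : Int) - 48

theorem A_eq (s : String) (c0 : Char) (t : List Char) (hs : s.toList = c0 :: t) :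
    Greedy_backwards s = (loopA (t.map bitOf)).1 + (loopA (t.map bitOf)).2 := by
  have hlen : PySem.Str.len s - 1 = (t.length : Int) := by
    rw [PySem.Str.len_eq, hs]; simp
  have hstep : stepA s = fun st i => gA st (fdig s.toList i) := rfl
  have M : (List.range t.length).map (fun (k : Nat) => fdig (c0 :: t) (1 + (k : Int))) = t.map bitOf := by
    apply List.ext_getElem (by simp)
    intro k h1 h2
    simp only [List.getElem_map, List.getElem_range]
    rw [fdig, show (1 : Int) + (k : Int) = ((k + 1 : Nat) : Int) by push_cast; ring,
      PySem.List.pyGetD_natCast, List.getD_cons_succ,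
      List.getD_eq_getElem t '0' (by simpa using h2)]
    rfl
  have hfold : ∀ (l : List Nat) (init : Int × Int),
      ((l.map (fun (k : Nat) => (1 : Int) + (k : Int))).reverse).foldl (fun st i => gA st (fdig (c0 :: t) i)) init
      = ((l.map (fun (k : Nat) => fdig (c0 :: t) (1 + (k : Int)))).reverse).foldl gA init := by
    intro l init
    rw [← List.map_reverse, ← List.map_reverse, List.foldl_map, List.foldl_map]
  unfold Greedy_backwards
  rw [hlen, PySem.List.pyRange_neg_one_eq_reverse, zero_add, PySem.List.pyRange_one,
    show ((t.length : Int) + 1 - 1).toNat = t.length by omega, hstep, hs, hfold, M]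
  rfl

-- ===== VERDICT (by name: the statement is the Claim_ definition above) =====
theorem Greedy_backwards_spec : Claim_equal_Greedy_backwards := by
  intro s _
  unfold Spec_Greedy_backwards
  cases hs : s.toList with
  | nil =>
    have hA : Greedy_backwards s = 0 := by
      unfold Greedy_backwards
      rw [PySem.Str.len_eq, hs]
      rfl
    have hB : Greedy_backwards_alt s = 0 := by
      unfold Greedy_backwards_alt
      rw [PySem.Str.len_eq, hs]
      rfl
    rw [hA, hB]
  | cons c0 t =>
    rw [A_eq s c0 t hs, loopA_eq_bloop]
    unfold Greedy_backwards_alt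
    dsimp only
    rw [PySem.Str.len_eq, hs, PySem.List.slice_from_one]
    rw [show (c0 :: t).tail = t from rfl,
      show ((c0 :: t).length : Int) - 1 = (t.length : Int) by simp,
      show (t.foldl (fun (a : Int) (c : Char) => 2 * a + ((c.toNat : Int) - 48)) 0)
         = (t.map bitOf).foldl (fun a d => 2 * a + d) 0 from (List.foldl_map).symm,
      foldl_const_round, PySem.List.length_pyRange_one,
      show ((t.length : Int) - 0).toNat = (t.map bitOf).length by simp]
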